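-- pv_equiv track=rewrite | github.com/djentleman/insta-image-search | backend/build_hashtag_classifier.py | clean_hashtags
-- ===== SOURCE A (Python) =====
-- from functools import reduce
--
-- def clean_hashtags(hashtags):
--     hashtags =  [h.replace(' ', '') for h in hashtags if h[0] == '#']
--     if len(hashtags) == 0:
--         return []
--     split_hashtags = [ht.split('#') for ht in hashtags]
--     # rejoin
--     hashtags = list(reduce(lambda x, y: x + y, split_hashtags))
--     hashtags = [ht if ht[0] == '#' else '#' + ht for ht in hashtags if ht != '']
--     hashtags = list(set(hashtags))
--     return hashtags
-- ===== SOURCE B (Python) =====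
-- def clean_hashtags(hashtags):
--     result = set()
--     for h in hashtags:
--         if h[0] != '#':
--             continue
--         for piece in h.replace(' ', '').split('#'):
--             if piece:
--                 result.add('#' + piece)
--     return list(result)
-- ===== Notes on version B (the rewrite author's own statement) =====
-- stated objective: simpler
-- what changed: A's five sequential passes (filter+strip comprehension, per-string split, reduce-concatenation of all the piece lists, a ternary '#'-prefix comprehension, then set()) become one loop that, per kept string, adds '#'+piece to a result set directly, with the dead ternary branch removed since split('#') pieces never start with '#'.
import Mathlib
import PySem

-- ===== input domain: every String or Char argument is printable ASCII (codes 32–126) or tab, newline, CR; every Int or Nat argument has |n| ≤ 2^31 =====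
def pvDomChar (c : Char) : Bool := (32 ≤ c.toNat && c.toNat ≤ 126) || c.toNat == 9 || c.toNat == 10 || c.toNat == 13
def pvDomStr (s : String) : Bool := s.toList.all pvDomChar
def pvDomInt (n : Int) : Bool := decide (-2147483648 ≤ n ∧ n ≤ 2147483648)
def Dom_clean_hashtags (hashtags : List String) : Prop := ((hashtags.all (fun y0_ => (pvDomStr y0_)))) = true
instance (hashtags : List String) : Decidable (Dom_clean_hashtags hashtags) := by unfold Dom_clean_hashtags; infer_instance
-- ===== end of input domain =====

-- B replaces A's five intermediate list passes (filter/map, per-string split, reduce-join, ternary-prefix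
-- comprehension, final set()) by one loop that adds '#'+piece to a set directly (objective: simpler).

-- ===== PORT A =====
def clean_hashtags (hashtags : List String) : List String :=
  -- hashtags = [h.replace(' ', '') for h in hashtags if h[0] == '#']
  let hs := (hashtags.filter (fun h => PySem.Str.pyGet? h 0 == some '#')).map
              (fun h => PySem.Str.replace h " " "")
  -- if len(hashtags) == 0: return []
  if hs.length == 0 then []
  else
    -- split_hashtags = [ht.split('#') for ht in hashtags]   (split? is some: "#" ≠ "")
    let split_hashtags := hs.map (fun ht => (PySem.Str.split? ht "#").getD [])
    -- hashtags = list(reduce(lambda x, y: x + y, split_hashtags))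
    let joined := match split_hashtags with
      | [] => []
      | x :: rest => rest.foldl (fun a b => a ++ b) x
    -- hashtags = [ht if ht[0] == '#' else '#' + ht for ht in hashtags if ht != '']
    -- ('#' + ht ported as String.ofList ('#' :: ht.toList); exact code-point concatenation)
    let pref := (joined.filter (fun ht => ht != "")).map
      (fun ht => if PySem.Str.pyGet? ht 0 == some '#' then ht else String.ofList ('#' :: ht.toList))
    -- hashtags = list(set(hashtags))
    PySem.Set.ofList pref

-- ===== PORT B =====
def clean_hashtags_alt (hashtags : List String) : List String :=
  hashtags.foldl (fun result h =>
    if PySem.Str.pyGet? h 0 != some '#' then result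
    else
      ((PySem.Str.split? (PySem.Str.replace h " " "") "#").getD []).foldl
        (fun result piece =>
          if piece != "" then PySem.Set.add result (String.ofList ('#' :: piece.toList))
          else result)
        result)
    []

-- ===== PRECONDITION & SPEC =====
-- Python A evaluates h[0] for every input string, so any empty string in the list raises IndexError
-- (B raises there too); Pre_ excludes exactly the lists containing an empty string.
def Pre_clean_hashtags (hashtags : List String) : Prop := ∀ h ∈ hashtags, h ≠ ""
instance (hashtags : List String) : Decidable (Pre_clean_hashtags hashtags) := by unfold Pre_clean_hashtags; infer_instance
def pvWitness_clean_hashtags : List String := ["# a b", "x", "#c#d", "#c"]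

def Spec_clean_hashtags (hashtags : List String) (out : List String) : Prop := out = clean_hashtags_alt hashtags
instance (hashtags : List String) (out : List String) : Decidable (Spec_clean_hashtags hashtags out) := by unfold Spec_clean_hashtags; infer_instance

-- ===== CLAIM (what is proved, stated in full; the proofs are below) =====
def Claim_equal_clean_hashtags : Prop := ∀ (hashtags : List String), Dom_clean_hashtags hashtags → Pre_clean_hashtags hashtags → Spec_clean_hashtags hashtags (clean_hashtags hashtags)

-- ===== LEMMAS AND PROOFS =====

-- pieces produced by splitOn.go on a single-character separator never contain that character
theorem splitOn_go_not_mem (c : Char) :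
    ∀ (fuel : Nat) (l cur : List Char) (acc : List (List Char)),
      l.length ≤ fuel → c ∉ cur → (∀ p ∈ acc, c ∉ p) →
      ∀ p ∈ PySem.Chars.splitOn.go [c] fuel l cur acc, c ∉ p := by
  intro fuel
  induction fuel with
  | zero =>
    intro l cur acc hl hcur hacc p hp
    have hl0 : l = [] := List.length_eq_zero_iff.mp (Nat.le_zero.mp hl)
    subst hl0
    rw [PySem.Chars.splitOn.go] at hp
    simp at hp
    rcases hp with h | h
    · exact hacc _ h
    · subst h; simpa using hcur
  | succ n ih =>
    intro l cur acc hl hcur hacc p hp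
    cases l with
    | nil =>
      rw [PySem.Chars.splitOn.go.eq_2 [c] (n+1) cur acc (by omega)] at hp
      simp at hp
      rcases hp with h | h
      · exact hacc _ h
      · subst h; simpa using hcur
    | cons d rest =>
      rw [PySem.Chars.splitOn.go.eq_3] at hp
      by_cases hpre : [c].isPrefixOf (d :: rest) = true
      · rw [if_pos hpre] at hp
        refine ih _ [] _ (by simpa using Nat.le_of_succ_le_succ hl) (by simp) ?_ p hp
        intro q hq
        rcases List.mem_cons.mp hq with h | h
        · subst h; simpa using hcur
        · exact hacc _ h
      · rw [if_neg hpre] at hp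
        have hd : d ≠ c := by
          intro h; subst h
          simp [List.isPrefixOf] at hpre
        refine ih rest (d :: cur) acc (by simpa using Nat.le_of_succ_le_succ hl) ?_ hacc p hp
        simp [hcur, Ne.symm hd]

theorem splitOn_not_mem (c : Char) (s : List Char) :
    ∀ p ∈ PySem.Chars.splitOn s [c], c ∉ p := by
  intro p hp
  exact splitOn_go_not_mem c (s.length + 1) s [] [] (by omega) (by simp) (by simp) p hp

-- string-level: every piece of ht.split('#') is free of '#'
theorem split_pieces (ht : String) :
    ∀ p ∈ (PySem.Str.split? ht "#").getD [], ('#' : Char) ∉ p.toList := by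
  intro p hp
  have h1 : PySem.Str.split? ht "#" = some ((PySem.Chars.splitOn ht.toList ['#']).map String.ofList) := by
    simp [PySem.Str.split?, PySem.Chars.split?]
  rw [h1] at hp
  simp at hp
  obtain ⟨q, hq, rfl⟩ := hp
  simpa using splitOn_not_mem '#' ht.toList q hq

-- B's inner loop is a fold of Set.add over the filtered, prefixed pieces
theorem inner_fold (l : List String) (s : PySem.Set String) :
    l.foldl (fun r p => if p != "" then PySem.Set.add r (String.ofList ('#' :: p.toList)) else r) s
      = ((l.filter (fun p => p != "")).map (fun p => String.ofList ('#' :: p.toList))).foldl PySem.Set.add s := by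
  induction l generalizing s with
  | nil => rfl
  | cons x xs ih =>
    by_cases hx : (x != "") = true
    · simp only [List.foldl_cons, List.filter_cons, hx, if_pos, List.map_cons]
      exact ih _
    · simp only [List.foldl_cons, List.filter_cons, hx]
      simpa using ih s

-- B's outer loop is a fold of Set.add over a flatMap of the kept strings
theorem outer_fold (F : String → List String) (xs : List String) (s : PySem.Set String) :
    xs.foldl (fun r h => if PySem.Str.pyGet? h 0 != some '#' then r else (F h).foldl PySem.Set.add r) s
      = ((xs.filter (fun h => PySem.Str.pyGet? h 0 == some '#')).flatMap F).foldl PySem.Set.add s := by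
  induction xs generalizing s with
  | nil => rfl
  | cons x l ih =>
    by_cases hx : (PySem.Str.pyGet? x 0 == some '#') = true
    · simp only [List.foldl_cons, List.filter_cons, hx, if_pos, List.flatMap_cons, List.foldl_append]
      have hx' : PySem.List.pyGet? x.toList 0 = some '#' := by
        have := eq_of_beq hx; simpa using this
      rw [if_neg (by simp [hx'])]
      exact ih _
    · simp only [List.foldl_cons, List.filter_cons, hx]
      rw [if_pos (by simpa using hx)]
      simpa [hx] using ih s

-- on '#'-free nonempty pieces A's ternary always takes the prepend branch
theorem ternary_map (l : List String)
    (hfree : ∀ p ∈ l, ('#' : Char) ∉ p.toList) :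
    (l.filter (fun p => p != "")).map
      (fun ht => if PySem.Str.pyGet? ht 0 == some '#' then ht else String.ofList ('#' :: ht.toList))
      = (l.filter (fun p => p != "")).map (fun p => String.ofList ('#' :: p.toList)) := by
  apply List.map_congr_left
  intro p hp
  have hmem := List.mem_of_mem_filter hp
  have hq : (p != "") = true := (List.mem_filter.mp hp).2
  have hnil : p.toList ≠ [] := by
    intro h; rw [String.toList_eq_nil_iff] at h; simp [h] at hq
  obtain ⟨a, t, ha⟩ := List.exists_cons_of_ne_nil hnil
  have hfa : a ≠ '#' := by
    intro h; exact hfree p hmem (by rw [ha, h]; exact List.mem_cons_self)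
  rw [if_neg (by simp [ha, hfa])]

-- A's reduce(+) match is List.flatten
theorem join_match (L : List (List String)) :
    (match L with
      | [] => ([] : List String)
      | x :: rest => rest.foldl (fun a b => a ++ b) x) = L.flatten := by
  cases L with
  | nil => rfl
  | cons x rest =>
    simp only [List.flatten_cons]
    rw [show (fun (a b : List String) => a ++ b) = (fun a x => a ++ id x) from rfl,
      PySem.List.foldl_append_eq_flatMap]
    simp

theorem main_eq (hashtags : List String) :
    clean_hashtags hashtags = clean_hashtags_alt hashtags := by
  unfold clean_hashtags clean_hashtags_alt
  simp only [inner_fold, outer_fold, ← PySem.Set.ofList_eq_foldl]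
  set P : String → Bool := fun h => PySem.Str.pyGet? h 0 == some '#' with hP
  set rep : String → String := fun h => PySem.Str.replace h " " "" with hrep
  set splt : String → List String := fun ht => (PySem.Str.split? ht "#").getD [] with hsplt
  by_cases h0 : ((hashtags.filter P).map rep).length == 0
  · rw [if_pos h0]
    have : hashtags.filter P = [] := by
      have h1 : ((hashtags.filter P).map rep).length = 0 := by simpa using h0
      simpa using h1
    rw [this]
    rfl
  · rw [if_neg (by simpa using h0)]
    congr 1
    rw [join_match]
    rw [← List.flatMap_def]
    rw [List.filter_flatMap, List.map_flatMap]
    rw [List.flatMap_map]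
    apply List.flatMap_congr
    intro h _
    exact ternary_map (splt (rep h)) (split_pieces (rep h))

-- ===== VERDICT (by name: the statement is the Claim_ definition above) =====
theorem clean_hashtags_spec : Claim_equal_clean_hashtags := by
  intro hashtags _dom _pre
  exact main_eq hashtags
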